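-- pv_equiv track=rewrite | github.com/mahekanna/gann_robot_V1 | gann_square_of_9.py | find_buy_sell_levels
-- ===== SOURCE A (Python) =====
-- def find_buy_sell_levels(price, gann_values):
--     """Finds the nearest Buy and Sell levels from the 0deg angle."""
--     buy_above = None
--     sell_below = None
--     closest_above = None
--     closest_below = None
--
--     if '0deg' in gann_values:
--         for value in gann_values['0deg']:
--             if value > price and (closest_above is None or value < closest_above):
--                 closest_above = value
--                 buy_above = ('0deg', value)
--             if value < price and (closest_below is None or value > closest_below):
--                 closest_below = value
--                 sell_below = ('0deg', value)
--
--     return buy_above, sell_below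
-- ===== SOURCE B (Python) =====
-- def _bisect_left(a, x):
--     lo, hi = 0, len(a)
--     while lo < hi:
--         mid = (lo + hi) // 2
--         if a[mid] < x:
--             lo = mid + 1
--         else:
--             hi = mid
--     return lo
--
--
-- def _bisect_right(a, x):
--     lo, hi = 0, len(a)
--     while lo < hi:
--         mid = (lo + hi) // 2
--         if x < a[mid]:
--             hi = mid
--         else:
--             lo = mid + 1
--     return lo
--
--
-- def find_buy_sell_levels(price, gann_values):
--     """Finds the nearest Buy and Sell levels from the 0deg angle."""
--     if '0deg' not in gann_values:
--         return None, None
--     vals = sorted(gann_values['0deg'])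
--     lo = _bisect_left(vals, price)
--     hi = _bisect_right(vals, price)
--     sell_below = ('0deg', vals[lo - 1]) if lo > 0 else None
--     buy_above = ('0deg', vals[hi]) if hi < len(vals) else None
--     return buy_above, sell_below
-- ===== Notes on version B (the rewrite author's own statement) =====
-- stated objective: alternative
-- what changed: Replaces the single linear scan threading four accumulators with sort-then-binary-search: sort the 0deg values, locate price by hand-written bisect_left/bisect_right, take the element before the left boundary as sell and the element at the right boundary as buy.
import Mathlib
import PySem

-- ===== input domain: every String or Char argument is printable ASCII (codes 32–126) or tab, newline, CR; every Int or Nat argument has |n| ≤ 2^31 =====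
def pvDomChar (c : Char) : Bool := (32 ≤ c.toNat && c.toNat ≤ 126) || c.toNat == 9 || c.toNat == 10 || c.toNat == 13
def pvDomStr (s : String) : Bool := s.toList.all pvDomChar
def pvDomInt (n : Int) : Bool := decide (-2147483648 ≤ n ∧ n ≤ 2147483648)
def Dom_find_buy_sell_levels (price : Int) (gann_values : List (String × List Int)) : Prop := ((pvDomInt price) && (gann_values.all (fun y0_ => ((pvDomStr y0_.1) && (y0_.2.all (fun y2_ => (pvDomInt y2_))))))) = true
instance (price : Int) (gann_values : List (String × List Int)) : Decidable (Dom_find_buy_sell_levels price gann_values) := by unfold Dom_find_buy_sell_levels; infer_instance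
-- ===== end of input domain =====

-- B replaces A's four-accumulator linear scan by sort + hand-written binary search (objective: alternative).


-- ===== PORT A =====
-- one loop step of A: both ifs, in order, over the state (buy_above, sell_below, closest_above, closest_below)
def pvStepA (price : Int)
    (st : Option (String × Int) × Option (String × Int) × Option Int × Option Int) (value : Int) :
    Option (String × Int) × Option (String × Int) × Option Int × Option Int :=
  let buy := st.1
  let sell := st.2.1
  let ca := st.2.2.1
  let cb := st.2.2.2
  let p1 := if decide (price < value) && (ca.elim true (fun c => decide (value < c)))
            then ((some value : Option Int), (some ("0deg", value) : Option (String × Int)))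
            else (ca, buy)
  let p2 := if decide (value < price) && (cb.elim true (fun c => decide (c < value)))
            then ((some value : Option Int), (some ("0deg", value) : Option (String × Int)))
            else (cb, sell)
  (p1.2, p2.2, p1.1, p2.1)

def find_buy_sell_levels (price : Int) (gann_values : List (String × List Int)) :
    (Option (String × Int)) × (Option (String × Int)) :=
  let st0 : Option (String × Int) × Option (String × Int) × Option Int × Option Int :=
    (none, none, none, none)
  let st :=
    if (PySem.Dict.mk gann_values).contains "0deg" then
      (((PySem.Dict.mk gann_values).get? "0deg").getD []).foldl (pvStepA price) st0
    else st0
  (st.1, st.2.1)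

-- ===== PORT B =====
-- Source B's hand-written _bisect_left/_bisect_right are exactly the loops of
-- PySem.List.bisectLeft / bisectRight (same midpoint (lo+hi)//2, same branch order).
def find_buy_sell_levels_alt (price : Int) (gann_values : List (String × List Int)) :
    (Option (String × Int)) × (Option (String × Int)) :=
  match (PySem.Dict.mk gann_values).get? "0deg" with
  | none => (none, none)
  | some values =>
    let vals := PySem.List.sorted values (fun v => v)
    let lo := PySem.List.bisectLeft vals price
    let hi := PySem.List.bisectRight vals price
    let sell_below : Option (String × Int) :=
      if 0 < lo then (vals[lo - 1]?).map (fun v => ("0deg", v)) else none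
    let buy_above : Option (String × Int) :=
      if hi < vals.length then (vals[hi]?).map (fun v => ("0deg", v)) else none
    (buy_above, sell_below)

-- ===== PRECONDITION & SPEC =====
def Spec_find_buy_sell_levels (price : Int) (gann_values : List (String × List Int)) (out : (Option (String × Int)) × (Option (String × Int))) : Prop := out = find_buy_sell_levels_alt price gann_values
instance (price : Int) (gann_values : List (String × List Int)) (out : (Option (String × Int)) × (Option (String × Int))) : Decidable (Spec_find_buy_sell_levels price gann_values out) := by unfold Spec_find_buy_sell_levels; infer_instance

-- ===== CLAIM =====
def Claim_equal_find_buy_sell_levels : Prop := ∀ (price : Int) (gann_values : List (String × List Int)), Dom_find_buy_sell_levels price gann_values → Spec_find_buy_sell_levels price gann_values (find_buy_sell_levels price gann_values)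

-- ===== LEMMAS AND PROOFS =====

-- A's running "closest above"/"closest below" accumulators, isolated
def pvMinAcc (c : Option Int) (l : List Int) : Option Int :=
  l.foldl (fun c v => match c with
    | none => some v
    | some c0 => if v < c0 then some v else some c0) c

def pvMaxAcc (c : Option Int) (l : List Int) : Option Int :=
  l.foldl (fun c v => match c with
    | none => some v
    | some c0 => if c0 < v then some v else some c0) c

lemma pvStepA_eq (price : Int) (st : Option (String × Int) × Option (String × Int) × Option Int × Option Int) (v : Int) :
    pvStepA price st v =
      (if decide (price < v) && (st.2.2.1.elim true (fun c => decide (v < c)))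
        then some ("0deg", v) else st.1,
       if decide (v < price) && (st.2.2.2.elim true (fun c => decide (c < v)))
        then some ("0deg", v) else st.2.1,
       if decide (price < v) && (st.2.2.1.elim true (fun c => decide (v < c)))
        then some v else st.2.2.1,
       if decide (v < price) && (st.2.2.2.elim true (fun c => decide (c < v)))
        then some v else st.2.2.2) := by
  simp only [pvStepA]
  split_ifs <;> rfl

lemma loopA (price : Int) (vals : List Int) (ca cb : Option Int) :
    vals.foldl (pvStepA price)
      (ca.map (fun v => ("0deg", v)), cb.map (fun v => ("0deg", v)), ca, cb)
    = ((pvMinAcc ca (vals.filter (fun v => decide (price < v)))).map (fun v => ("0deg", v)),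
       (pvMaxAcc cb (vals.filter (fun v => decide (v < price)))).map (fun v => ("0deg", v)),
       pvMinAcc ca (vals.filter (fun v => decide (price < v))),
       pvMaxAcc cb (vals.filter (fun v => decide (v < price)))) := by
  induction vals generalizing ca cb with
  | nil => rfl
  | cons v t ih =>
    have hstep := pvStepA_eq price (ca.map (fun v => ("0deg", v)), cb.map (fun v => ("0deg", v)), ca, cb) v
    simp only [List.foldl_cons, hstep]
    have hca : (if decide (price < v) && (ca.elim true (fun c => decide (v < c)))
        then (some v : Option Int) else ca) = pvMinAcc ca (List.filter (fun v => decide (price < v)) [v]) := by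
      rcases ca with _ | c0
      · by_cases hp : price < v <;> simp [pvMinAcc, hp]
      · by_cases hp : price < v <;> by_cases hv : v < c0 <;>
          simp [pvMinAcc, hp, hv]
    have hcb : (if decide (v < price) && (cb.elim true (fun c => decide (c < v)))
        then (some v : Option Int) else cb) = pvMaxAcc cb (List.filter (fun v => decide (v < price)) [v]) := by
      rcases cb with _ | c0
      · by_cases hp : v < price <;> simp [pvMaxAcc, hp]
      · by_cases hp : v < price <;> by_cases hv : c0 < v <;>
          simp [pvMaxAcc, hp, hv]
    have hbuy : (if decide (price < v) && (ca.elim true (fun c => decide (v < c)))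
        then (some ("0deg", v) : Option (String × Int)) else ca.map (fun v => ("0deg", v)))
        = (pvMinAcc ca (List.filter (fun v => decide (price < v)) [v])).map (fun v => ("0deg", v)) := by
      rw [← hca]; split_ifs <;> rfl
    have hsell : (if decide (v < price) && (cb.elim true (fun c => decide (c < v)))
        then (some ("0deg", v) : Option (String × Int)) else cb.map (fun v => ("0deg", v)))
        = (pvMaxAcc cb (List.filter (fun v => decide (v < price)) [v])).map (fun v => ("0deg", v)) := by
      rw [← hcb]; split_ifs <;> rfl
    rw [hbuy, hsell, hca, hcb, ih]
    have h1 : ∀ l : List Int,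
        pvMinAcc (pvMinAcc ca (List.filter (fun v => decide (price < v)) [v])) (List.filter (fun v => decide (price < v)) l)
        = pvMinAcc ca (List.filter (fun v => decide (price < v)) (v :: l)) := by
      intro l; simp only [pvMinAcc, List.filter_cons]
      split_ifs <;> simp [List.filter, List.foldl]
    have h2 : ∀ l : List Int,
        pvMaxAcc (pvMaxAcc cb (List.filter (fun v => decide (v < price)) [v])) (List.filter (fun v => decide (v < price)) l)
        = pvMaxAcc cb (List.filter (fun v => decide (v < price)) (v :: l)) := by
      intro l; simp only [pvMaxAcc, List.filter_cons]
      split_ifs <;> simp [List.filter, List.foldl]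
    rw [h1, h2]

lemma pvMinAcc_some (l : List Int) (c : Int) : pvMinAcc (some c) l = some (l.foldl min c) := by
  induction l generalizing c with
  | nil => rfl
  | cons v t ih =>
    simp only [pvMinAcc, List.foldl_cons] at *
    have : (if v < c then (some v : Option Int) else some c) = some (min c v) := by
      split_ifs <;> simp <;> omega
    rw [this, ih]

lemma pvMaxAcc_some (l : List Int) (c : Int) : pvMaxAcc (some c) l = some (l.foldl max c) := by
  induction l generalizing c with
  | nil => rfl
  | cons v t ih =>
    simp only [pvMaxAcc, List.foldl_cons] at *
    have : (if c < v then (some v : Option Int) else some c) = some (max c v) := by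
      split_ifs <;> simp <;> omega
    rw [this, ih]

lemma pvMinAcc_none_eq (l : List Int) : pvMinAcc none l = l.min? := by
  cases l with
  | nil => rfl
  | cons x t =>
    have : pvMinAcc none (x :: t) = pvMinAcc (some x) t := rfl
    rw [this, pvMinAcc_some]; rfl

lemma pvMaxAcc_none_eq (l : List Int) : pvMaxAcc none l = l.max? := by
  cases l with
  | nil => rfl
  | cons x t =>
    have : pvMaxAcc none (x :: t) = pvMaxAcc (some x) t := rfl
    rw [this, pvMaxAcc_some]; rfl

-- B's buy side: the element of the sorted list at bisectRight is the minimum of the strict-above filter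
lemma buy_side (price : Int) (values : List Int) :
    (if PySem.List.bisectRight (PySem.List.sorted values (fun v => v)) price
          < (PySem.List.sorted values (fun v => v)).length
      then ((PySem.List.sorted values (fun v => v))[PySem.List.bisectRight (PySem.List.sorted values (fun v => v)) price]?)
      else none)
    = pvMinAcc none (values.filter (fun v => decide (price < v))) := by
  set s := PySem.List.sorted values (fun v => v) with hs
  have hperm : s.Perm values := PySem.List.sorted_perm values (fun v => v) false
  have hpw : List.Pairwise (fun a b => a ≤ b) s := PySem.List.sorted_pairwise values (fun v => v)
  obtain ⟨hle, hbelow, habove⟩ := PySem.List.bisectRight_spec s price hpw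
  set hi := PySem.List.bisectRight s price with hhi
  rw [pvMinAcc_none_eq]
  by_cases h : hi < s.length
  · rw [if_pos h, List.getElem?_eq_getElem h]
    symm; rw [List.min?_eq_some_iff]
    constructor
    · rw [List.mem_filter]
      exact ⟨hperm.mem_iff.mp (List.getElem_mem h), by simpa using habove hi h le_rfl⟩
    · intro b hb
      rw [List.mem_filter] at hb
      obtain ⟨hbm, hbp⟩ := hb
      simp only [decide_eq_true_eq] at hbp
      obtain ⟨j, hj, hjb⟩ := List.mem_iff_getElem.mp (hperm.mem_iff.mpr hbm)
      rcases lt_or_ge j hi with hcase | hcase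
      · exact absurd (hbelow j hj hcase) (by omega)
      · rcases eq_or_lt_of_le hcase with hceq | hclt
        · have hegg : s[hi] = s[j] := by simp [hceq]
          omega
        · have hmono : s[hi] ≤ s[j] := by
            simpa using (List.pairwise_iff_getElem.mp hpw) hi j h hj hclt
          omega
  · rw [if_neg h]
    symm; rw [List.min?_eq_none_iff, List.filter_eq_nil_iff]
    intro a ha
    obtain ⟨j, hj, hja⟩ := List.mem_iff_getElem.mp (hperm.mem_iff.mpr ha)
    have : j < hi := by omega
    have := hbelow j hj this
    simp; omega

-- B's sell side: the element of the sorted list just before bisectLeft is the maximum of the strict-below filter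
lemma sell_side (price : Int) (values : List Int) :
    (if 0 < PySem.List.bisectLeft (PySem.List.sorted values (fun v => v)) price
      then ((PySem.List.sorted values (fun v => v))[PySem.List.bisectLeft (PySem.List.sorted values (fun v => v)) price - 1]?)
      else none)
    = pvMaxAcc none (values.filter (fun v => decide (v < price))) := by
  set s := PySem.List.sorted values (fun v => v) with hs
  have hperm : s.Perm values := PySem.List.sorted_perm values (fun v => v) false
  have hpw : List.Pairwise (fun a b => a ≤ b) s := PySem.List.sorted_pairwise values (fun v => v)
  obtain ⟨hle, hbelow, habove⟩ := PySem.List.bisectLeft_spec s price hpw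
  set lo := PySem.List.bisectLeft s price with hlo
  rw [pvMaxAcc_none_eq]
  by_cases h : 0 < lo
  · have hidx : lo - 1 < s.length := by omega
    rw [if_pos h, List.getElem?_eq_getElem hidx]
    symm; rw [List.max?_eq_some_iff]
    constructor
    · rw [List.mem_filter]
      exact ⟨hperm.mem_iff.mp (List.getElem_mem hidx), by simpa using hbelow (lo - 1) hidx (by omega)⟩
    · intro b hb
      rw [List.mem_filter] at hb
      obtain ⟨hbm, hbp⟩ := hb
      simp only [decide_eq_true_eq] at hbp
      obtain ⟨j, hj, hjb⟩ := List.mem_iff_getElem.mp (hperm.mem_iff.mpr hbm)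
      rcases lt_or_ge j lo with hcase | hcase
      · rcases eq_or_lt_of_le (Nat.le_sub_one_of_lt hcase) with hceq | hclt
        · have hegg : s[j] = s[lo - 1] := by simp [hceq]
          omega
        · have hmono : s[j] ≤ s[lo - 1] := by
            simpa using (List.pairwise_iff_getElem.mp hpw) j (lo - 1) hj hidx hclt
          omega
      · exact absurd (habove j hj hcase) (by omega)
  · rw [if_neg h]
    symm; rw [List.max?_eq_none_iff, List.filter_eq_nil_iff]
    intro a ha
    obtain ⟨j, hj, hja⟩ := List.mem_iff_getElem.mp (hperm.mem_iff.mpr ha)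
    have := habove j hj (by omega)
    simp; omega

-- ===== VERDICT =====
theorem find_buy_sell_levels_spec : Claim_equal_find_buy_sell_levels := by
  intro price gann_values _
  unfold Spec_find_buy_sell_levels find_buy_sell_levels find_buy_sell_levels_alt
  cases h : (PySem.Dict.mk gann_values).get? "0deg" with
  | none =>
    have hc : (PySem.Dict.mk gann_values).contains "0deg" = false := by
      rw [PySem.Dict.contains_eq_isSome_get?, h]; rfl
    simp [hc]
  | some vals =>
    have hc : (PySem.Dict.mk gann_values).contains "0deg" = true := by
      rw [PySem.Dict.contains_eq_isSome_get?, h]; rfl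
    simp only [hc, if_true, Option.getD_some]
    have hA := loopA price vals none none
    simp only [Option.map_none] at hA
    rw [hA]
    have hbuy := buy_side price vals
    have hsell := sell_side price vals
    simp only [Prod.mk.injEq]
    refine ⟨?_, ?_⟩
    · rw [← hbuy]; split_ifs <;> rfl
    · rw [← hsell]; split_ifs <;> rfl
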